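-- pv_equiv track=rewrite | github.com/mmh132/ProjectEuler | work/orconvolve.py | orconvolve
-- ===== SOURCE A (Python) =====
-- mod = 69
--
-- def orconvolve(a, b):
--     n = 0
--     while (1 << n) < max(len(a), len(b)):
--         n += 1
--     while len(a) < 1 << n:
--         a.append(0)
--     while len(b) < 1 << n:
--         b.append(0)
--
--
--     for i in range(n):
--         for j in range(1<<n):
--             if (j >> i) & 1:
--                 a[j] += a[j - (1 << i)]
--                 a[j] %= mod
--                 b[j] += b[j - (1 << i)]
--                 b[j] %= mod
--
--     c = [(a[i]*b[i] % mod) for i in range(1 << n)]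
--     for i in range(n-1, -1, -1):
--         for j in range((1 << n) - 1, -1, -1):
--             if (j >> i) & 1:
--                 c[j] -= c[j - (1 << i)]
--                 c[j] %= mod
--
--     for i in range(len(c)):
--         c[i] += mod
--         c[i] %= mod
--
--     return c
-- ===== SOURCE B (Python) =====
-- mod = 69
--
-- def orconvolve(a, b):
--     # Same in-place zero-padding of the arguments as the original (observable mutation).
--     n = 0
--     while (1 << n) < max(len(a), len(b)):
--         n += 1
--     while len(a) < 1 << n:
--         a.append(0)
--     while len(b) < 1 << n:
--         b.append(0)
--     # Naive direct OR-convolution over all index pairs (no zeta/Moebius transforms).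
--     c = [0] * (1 << n)
--     for i in range(1 << n):
--         for j in range(1 << n):
--             k = i | j
--             c[k] = (c[k] + a[i] * b[j]) % mod
--     return c
-- ===== Notes on version B (the rewrite author's own statement) =====
-- stated objective: simpler
-- what changed: Replaces the in-place zeta transform / pointwise product / Moebius inverse pipeline by the direct all-pairs OR-convolution c[i|j] += a[i]*b[j] mod 69 (the same in-place zero padding of the arguments is kept).
import Mathlib
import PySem

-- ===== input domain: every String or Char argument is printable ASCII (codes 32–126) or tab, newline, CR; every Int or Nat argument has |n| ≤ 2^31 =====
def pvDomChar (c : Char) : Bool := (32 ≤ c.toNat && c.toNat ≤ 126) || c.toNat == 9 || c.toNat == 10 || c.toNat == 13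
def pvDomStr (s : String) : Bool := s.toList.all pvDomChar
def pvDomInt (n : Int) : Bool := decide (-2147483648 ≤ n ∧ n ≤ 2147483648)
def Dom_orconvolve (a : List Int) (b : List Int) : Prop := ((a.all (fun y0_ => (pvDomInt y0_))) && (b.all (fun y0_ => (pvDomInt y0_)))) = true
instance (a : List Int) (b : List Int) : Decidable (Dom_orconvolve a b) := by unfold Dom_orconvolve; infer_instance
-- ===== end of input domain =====

-- B replaces A's zeta-transform / pointwise-product / Moebius-inverse pipeline by the direct
-- all-pairs OR-convolution c[i|j] += a[i]*b[j] mod 69 (simpler, not faster); the equivalence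
-- proved here is about the RETURN value (both Pythons also pad their list arguments in place
-- with the same zeros, an identical side effect).

-- ===== PORT A =====
-- shared helper: `n = 0; while (1 << n) < m: n += 1` (both Pythons start with this loop)
def orcN (m : Nat) (n : Nat) : Nat :=
  if 1 <<< n < m then orcN m (n + 1) else n
termination_by m - n
decreasing_by
  rename_i h
  have hn : n < 1 <<< n := by simpa [Nat.one_shiftLeft] using Nat.lt_two_pow_self (n := n)
  omega

-- shared helper: `while len(xs) < N: xs.append(0)` (appending zeros up to length N)
def orcPad (xs : List Int) (N : Nat) : List Int := xs ++ List.replicate (N - xs.length) 0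

-- A's transform-loop body: `if (j >> i) & 1: c[j] = (c[j] op c[j - (1 << i)]) % mod`
-- (op is + in the zeta loops, - in the Moebius loop; indices are always in range, so
-- List.getD/List.set are exact for Python's c[j] here)
def orcStep (op : Int → Int → Int) (i : Nat) (c : List Int) (j : Nat) : List Int :=
  if (j >>> i) &&& 1 = 1 then
    c.set j (PySem.Int.mod (op (c.getD j 0) (c.getD (j - 1 <<< i) 0)) 69)
  else c

def orconvolve (a : List Int) (b : List Int) : List Int :=
  let n := orcN (max a.length b.length) 0
  let N := 1 <<< n
  let a2 := orcPad a N
  let b2 := orcPad b N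
  -- `for i in range(n): for j in range(1<<n): if (j>>i)&1: a[j] = (a[j]+a[j-(1<<i)])%mod; b[j] = ...`
  let ab := (List.range n).foldl (fun p i =>
      (List.range N).foldl (fun (p : List Int × List Int) j =>
        (orcStep (· + ·) i p.1 j, orcStep (· + ·) i p.2 j)) p) (a2, b2)
  -- `c = [(a[i]*b[i] % mod) for i in range(1 << n)]`
  let c0 := (List.range N).map (fun i => PySem.Int.mod (ab.1.getD i 0 * ab.2.getD i 0) 69)
  -- `for i in range(n-1,-1,-1): for j in range((1<<n)-1,-1,-1): if (j>>i)&1: c[j] = (c[j]-c[j-(1<<i)])%mod`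
  let c1 := ((List.range n).reverse).foldl (fun c i =>
      ((List.range N).reverse).foldl (fun c j => orcStep (· - ·) i c j) c) c0
  -- `for i in range(len(c)): c[i] += mod; c[i] %= mod`
  c1.map (fun x => PySem.Int.mod (x + 69) 69)

-- ===== PORT B =====
def orconvolve_alt (a : List Int) (b : List Int) : List Int :=
  let n := orcN (max a.length b.length) 0
  let N := 1 <<< n
  let a2 := orcPad a N
  let b2 := orcPad b N
  -- `c = [0]*(1<<n); for i in range(1<<n): for j in range(1<<n): k = i|j; c[k] = (c[k]+a[i]*b[j])%mod`
  (List.range N).foldl (fun c i =>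
    (List.range N).foldl (fun (c : List Int) j =>
      let k := i ||| j
      c.set k (PySem.Int.mod (c.getD k 0 + a2.getD i 0 * b2.getD j 0) 69)) c)
    (List.replicate N 0)

-- ===== PRECONDITION & SPEC =====
def Spec_orconvolve (a : List Int) (b : List Int) (out : List Int) : Prop := out = orconvolve_alt a b
instance (a : List Int) (b : List Int) (out : List Int) : Decidable (Spec_orconvolve a b out) := by unfold Spec_orconvolve; infer_instance

-- ===== CLAIM (what is proved, stated in full; the proofs are below) =====
def Claim_equal_orconvolve : Prop := ∀ (a : List Int) (b : List Int), Dom_orconvolve a b → Spec_orconvolve a b (orconvolve a b)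

-- ===== LEMMAS AND PROOFS =====

-- ---- bit-arithmetic facts about j - 2^i when bit i of j is set ----
theorem pvTestBit_sub_pow (j i t : Nat) (h : j.testBit i = true) :
    (j - 2 ^ i).testBit t = if t = i then false else j.testBit t := by
  have hp : 0 < 2 ^ i := Nat.two_pow_pos i
  have hle : 2 ^ i ≤ j := Nat.ge_two_pow_of_testBit h
  have hbit : j / 2 ^ i % 2 = 1 := by
    have := h; rw [Nat.testBit_eq_decide_div_mod_eq] at this; simpa using this
  set q := j / 2 ^ i / 2 with hq
  set r := j % 2 ^ i with hr
  have hdm : 2 ^ i * (j / 2 ^ i) + r = j := Nat.div_add_mod j (2 ^ i)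
  have hjp : j / 2 ^ i = 2 * q + 1 := by omega
  have hrlt : r < 2 ^ i := Nat.mod_lt _ hp
  have hj : j = 2 * (2 ^ i * q) + 2 ^ i + r := by
    rw [hjp] at hdm
    have : 2 ^ i * (2 * q + 1) = 2 * (2 ^ i * q) + 2 ^ i := by ring
    omega
  have hj' : j - 2 ^ i = 2 ^ i * (2 * q) + r := by
    have e0 : 2 ^ i * (2 * q) = 2 * (2 ^ i * q) := by ring
    omega
  rcases lt_trichotomy t i with hti | heq | hti
  · -- low bits unchanged
    simp only [if_neg (by omega : ¬ t = i)]
    rw [Nat.testBit_eq_decide_div_mod_eq, Nat.testBit_eq_decide_div_mod_eq]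
    have hsplit : 2 ^ i = 2 ^ t * (2 * 2 ^ (i - t - 1)) := by
      rw [← Nat.pow_succ']
      rw [← pow_add]
      congr 1; omega
    have h1 : j / 2 ^ t = (j - 2 ^ i) / 2 ^ t + 2 * 2 ^ (i - t - 1) := by
      have hjj : j = (j - 2 ^ i) + 2 ^ t * (2 * 2 ^ (i - t - 1)) := by omega
      conv_lhs => rw [hjj]
      rw [Nat.add_mul_div_left _ _ (Nat.two_pow_pos t)]
    have h2 : j / 2 ^ t % 2 = (j - 2 ^ i) / 2 ^ t % 2 := by rw [h1]; omega
    rw [h2]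
  · rw [heq, if_pos rfl]
    rw [Nat.testBit_eq_decide_div_mod_eq]
    have : (j - 2 ^ i) / 2 ^ i = 2 * q + r / 2 ^ i := by
      rw [hj', Nat.mul_add_div hp]
    rw [this, Nat.div_eq_of_lt hrlt]
    simp only [Nat.add_zero, decide_eq_false_iff_not]
    omega
  · -- high bits unchanged
    simp only [if_neg (by omega : ¬ t = i)]
    rw [Nat.testBit_eq_decide_div_mod_eq, Nat.testBit_eq_decide_div_mod_eq]
    have e1 : 2 ^ t = 2 ^ i * 2 * 2 ^ (t - i - 1) := by
      rw [mul_assoc, ← pow_succ']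
      rw [← pow_add]; congr 1; omega
    have hdivj : j / (2 ^ i * 2) = q := by
      rw [← Nat.div_div_eq_div_mul]
    have hdivj' : (j - 2 ^ i) / (2 ^ i * 2) = q := by
      have : j - 2 ^ i = (2 ^ i * 2) * q + r := by
        rw [hj']; ring_nf
      rw [this, Nat.mul_add_div (by positivity), Nat.div_eq_of_lt (by omega)]
      omega
    have h3 : j / 2 ^ t = q / 2 ^ (t - i - 1) := by
      rw [e1, ← Nat.div_div_eq_div_mul, hdivj]
    have h4 : (j - 2 ^ i) / 2 ^ t = q / 2 ^ (t - i - 1) := by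
      rw [e1, ← Nat.div_div_eq_div_mul, hdivj']
    rw [h3, h4]


theorem pvShiftRight_eq_iff (x y k : Nat) :
    x >>> k = y >>> k ↔ ∀ t, k ≤ t → x.testBit t = y.testBit t := by
  constructor
  · intro h t ht
    have := congrArg (fun z => Nat.testBit z (t - k)) h
    simpa [Nat.testBit_shiftRight, Nat.add_sub_cancel' ht] using this
  · intro h
    apply Nat.eq_of_testBit_eq
    intro m
    simp only [Nat.testBit_shiftRight]
    exact h (k + m) (Nat.le_add_right _ _)


theorem pvSubset_iff (s j : Nat) :
    s ||| j = j ↔ ∀ t, s.testBit t = true → j.testBit t = true := by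
  constructor
  · intro h t hs
    have := congrArg (fun z => Nat.testBit z t) h
    simp only [Nat.testBit_or, hs, Bool.true_or] at this
    exact this.symm
  · intro h
    apply Nat.eq_of_testBit_eq
    intro t
    simp only [Nat.testBit_or]
    cases hs : s.testBit t
    · simp
    · simp [h t hs]


theorem pvCond_iff (j i : Nat) : ((j >>> i) &&& 1 = 1) ↔ j.testBit i = true := by
  rw [Nat.and_one_is_mod, Nat.testBit_eq_decide_div_mod_eq, Nat.shiftRight_eq_div_pow]
  simp


-- ---- the ideal (mod-free) per-bit butterflies and their compositions ----
def Ob (op : Int → Int → Int) (i : Nat) (g : Nat → Int) : Nat → Int :=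
  fun j => if j.testBit i = true then op (g j) (g (j - 2 ^ i)) else g j

def Ub : Nat → (Nat → Int) → Nat → Int
  | 0 => id
  | k + 1 => fun g => Ob (· + ·) k (Ub k g)

def Db : Nat → (Nat → Int) → Nat → Int
  | 0 => id
  | k + 1 => fun g => Db k (Ob (· - ·) k g)

theorem pvSb_Tb (i : Nat) (g : Nat → Int) : Ob (· - ·) i (Ob (· + ·) i g) = g := by
  funext j
  unfold Ob
  by_cases hb : j.testBit i = true
  · have hb' : (j - 2 ^ i).testBit i = false := by
      rw [pvTestBit_sub_pow j i i hb]; simp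
    simp [hb, hb']
  · simp [hb]


theorem pvDb_Ub (k : Nat) (g : Nat → Int) : Db k (Ub k g) = g := by
  induction k generalizing g with
  | zero => rfl
  | succ k ih =>
    show Db k (Ob (· - ·) k (Ob (· + ·) k (Ub k g))) = g
    rw [pvSb_Tb, ih]


-- ---- loop-shape: one inner pass of A's transform loops is a pointwise butterfly ----
theorem pvRoundUp (op : Int → Int → Int) (i : Nat) (v : List Int) (t : Nat) (ht : t ≤ v.length) :
    ((List.range t).foldl (orcStep op i) v).length = v.length ∧
    ∀ j : Nat, ((List.range t).foldl (orcStep op i) v).getD j 0 =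
      if j < t ∧ j.testBit i = true then PySem.Int.mod (op (v.getD j 0) (v.getD (j - 2 ^ i) 0)) 69
      else v.getD j 0 := by
  induction t with
  | zero => simp
  | succ t ih =>
    obtain ⟨ihl, ihe⟩ := ih (by omega)
    rw [List.range_succ, List.foldl_concat]
    set prev := (List.range t).foldl (orcStep op i) v with hprev
    unfold orcStep
    by_cases hc : (t >>> i) &&& 1 = 1
    · have hbt : t.testBit i = true := (pvCond_iff t i).mp hc
      have h2le : 2 ^ i ≤ t := Nat.ge_two_pow_of_testBit hbt
      have hsrc : (t - 2 ^ i).testBit i = false := by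
        rw [pvTestBit_sub_pow t i i hbt]; simp
      have hv1 : prev.getD t 0 = v.getD t 0 := by rw [ihe]; simp
      have hv2 : prev.getD (t - 1 <<< i) 0 = v.getD (t - 2 ^ i) 0 := by
        rw [Nat.one_shiftLeft, ihe, hsrc]; simp
      rw [if_pos hc]
      constructor
      · simp [ihl]
      · intro j
        by_cases hj : j = t
        · subst hj
          rw [List.getD_eq_getElem _ _ (by simp [ihl]; omega)]
          rw [List.getElem_set_self (by simp [ihl]; omega)]
          rw [hv1, hv2, if_pos ⟨by omega, hbt⟩]
        · have hset : (prev.set t (PySem.Int.mod (op (prev.getD t 0)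
              (prev.getD (t - 1 <<< i) 0)) 69)).getD j 0 = prev.getD j 0 := by
            simp [List.getD, List.getElem?_set, Ne.symm hj]
          rw [hset, ihe]
          by_cases hjt : j < t
          · have : (j < t ∧ j.testBit i = true) ↔ (j < t + 1 ∧ j.testBit i = true) := by
              constructor <;> (rintro ⟨h1, h2⟩; exact ⟨by omega, h2⟩)
            rw [if_congr this rfl rfl]
          · rw [if_neg (by omega ∘ And.left), if_neg (fun h => by omega)]
            
    · have hbt : ¬ t.testBit i = true := fun h => hc ((pvCond_iff t i).mpr h)
      rw [if_neg hc]
      refine ⟨ihl, fun j => ?_⟩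
      rw [ihe]
      by_cases hj : j = t
      · subst hj; simp [hbt]
      · by_cases hjt : j < t
        · have : (j < t ∧ j.testBit i = true) ↔ (j < t + 1 ∧ j.testBit i = true) := by
            constructor <;> (rintro ⟨h1, h2⟩; exact ⟨by omega, h2⟩)
          rw [if_congr this rfl rfl]
        · rw [if_neg (fun h => by omega), if_neg (fun h => by omega)]


theorem pvRoundDown (op : Int → Int → Int) (i : Nat) (v : List Int) (t : Nat) (ht : t ≤ v.length) :
    (((List.range t).reverse).foldl (orcStep op i) v).length = v.length ∧
    ∀ j : Nat, (((List.range t).reverse).foldl (orcStep op i) v).getD j 0 =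
      if j < t ∧ j.testBit i = true then PySem.Int.mod (op (v.getD j 0) (v.getD (j - 2 ^ i) 0)) 69
      else v.getD j 0 := by
  induction t generalizing v with
  | zero => simp
  | succ t ih =>
    rw [List.range_succ, List.reverse_append]
    simp only [List.reverse_cons, List.reverse_nil, List.nil_append, List.cons_append,
      List.foldl_cons]
    set v' := orcStep op i v t with hv'
    have hlen' : v'.length = v.length := by
      rw [hv']; unfold orcStep; split <;> simp
    obtain ⟨ihl, ihe⟩ := ih v' (by omega)
    refine ⟨by rw [ihl, hlen'], fun j => ?_⟩
    rw [ihe]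
    -- entries of v' in terms of v
    have hv'e : ∀ m : Nat, v'.getD m 0 =
        if m = t ∧ m.testBit i = true then
          PySem.Int.mod (op (v.getD m 0) (v.getD (m - 2 ^ i) 0)) 69
        else v.getD m 0 := by
      intro m
      rw [hv']; unfold orcStep
      by_cases hc : (t >>> i) &&& 1 = 1
      · have hbt : t.testBit i = true := (pvCond_iff t i).mp hc
        rw [if_pos hc]
        by_cases hm : m = t
        · subst hm
          have hmlt : m < v.length := by omega
          have hset : ∀ x : Int, (v.set m x).getD m 0 = x := by
            intro x; simp [List.getD, List.getElem?_set, hmlt]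
          rw [hset, Nat.one_shiftLeft, if_pos ⟨rfl, hbt⟩]
        · rw [if_neg (fun h => hm h.1)]
          simp [List.getD, List.getElem?_set, Ne.symm hm]
      · have hbt : ¬ t.testBit i = true := fun h => hc ((pvCond_iff t i).mpr h)
        rw [if_neg hc, if_neg (fun h : m = t ∧ m.testBit i = true => hbt (h.1 ▸ h.2))]
    by_cases hj : j < t ∧ j.testBit i = true
    · obtain ⟨hjt, hjb⟩ := hj
      have h2le : 2 ^ i ≤ j := Nat.ge_two_pow_of_testBit hjb
      have hsrc : (j - 2 ^ i).testBit i = false := by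
        rw [pvTestBit_sub_pow j i i hjb]; simp
      rw [if_pos ⟨hjt, hjb⟩, if_pos ⟨by omega, hjb⟩]
      rw [hv'e j, hv'e (j - 2 ^ i)]
      rw [if_neg (fun h => by omega), if_neg (by simp [hsrc])]
    · rw [if_neg hj, hv'e j]
      by_cases hjt : j = t
      · subst hjt
        by_cases hjb : j.testBit i = true
        · rw [if_pos ⟨rfl, hjb⟩, if_pos ⟨by omega, hjb⟩]
        · rw [if_neg (fun h => hjb h.2), if_neg (fun h => hjb h.2)]
      · rw [if_neg (fun h => hjt h.1), if_neg (fun h => hj ⟨by omega, h.2⟩)]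


-- ---- congruence transport: a list round tracks the ideal butterfly modulo 69 ----
theorem pvMod_modEq (x : Int) : PySem.Int.mod x 69 ≡ x [ZMOD 69] := by
  rw [PySem.Int.mod_eq_emod_of_pos (by norm_num)]
  exact Int.emod_emod_of_dvd x (dvd_refl 69)


theorem pvMod_bounds (x : Int) : 0 ≤ PySem.Int.mod x 69 ∧ PySem.Int.mod x 69 < 69 :=
  ⟨PySem.Int.mod_nonneg x (by norm_num), PySem.Int.mod_lt x (by norm_num)⟩


theorem pvRound_transport (op : Int → Int → Int)
    (hop : ∀ x x' y y' : Int, x ≡ x' [ZMOD 69] → y ≡ y' [ZMOD 69] → op x y ≡ op x' y' [ZMOD 69])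
    (i : Nat) (v : List Int) (g : Nat → Int)
    (H : ∀ j, j < v.length → v.getD j 0 ≡ g j [ZMOD 69]) :
    (∀ j, j < v.length →
      ((List.range v.length).foldl (orcStep op i) v).getD j 0 ≡ Ob op i g j [ZMOD 69]) ∧
    (∀ j, j < v.length →
      (((List.range v.length).reverse).foldl (orcStep op i) v).getD j 0 ≡ Ob op i g j [ZMOD 69]) := by
  have key : ∀ j, j < v.length →
      (if j < v.length ∧ j.testBit i = true then
        PySem.Int.mod (op (v.getD j 0) (v.getD (j - 2 ^ i) 0)) 69
      else v.getD j 0) ≡ Ob op i g j [ZMOD 69] := by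
    intro j hj
    unfold Ob
    by_cases hb : j.testBit i = true
    · rw [if_pos ⟨hj, hb⟩, if_pos hb]
      refine (pvMod_modEq _).trans ?_
      exact hop _ _ _ _ (H j hj) (H (j - 2 ^ i) (by have := Nat.sub_le j (2 ^ i); omega))
    · rw [if_neg (fun h => hb h.2), if_neg hb]
      exact H j hj
  constructor
  · intro j hj
    rw [(pvRoundUp op i v v.length le_rfl).2 j]
    exact key j hj
  · intro j hj
    rw [(pvRoundDown op i v v.length le_rfl).2 j]
    exact key j hj


-- ---- A's zeta loop (pair state) splits into two independent folds ----
theorem pvPairFold (op : Int → Int → Int) (i : Nat) (l : List Nat) (p : List Int × List Int) :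
    l.foldl (fun p j => (orcStep op i p.1 j, orcStep op i p.2 j)) p =
      (l.foldl (orcStep op i) p.1, l.foldl (orcStep op i) p.2) := by
  induction l generalizing p with
  | nil => rfl
  | cons x xs ih => simp only [List.foldl_cons, ih]


-- ---- invariants of A's two outer loops ----
theorem pvZeta (n : Nat) (v w : List Int) (hv : v.length = 2 ^ n) (hw : w.length = 2 ^ n)
    (k : Nat) :
    (((List.range k).foldl (fun p i =>
        (List.range (2 ^ n)).foldl (fun (p : List Int × List Int) j =>
          (orcStep (· + ·) i p.1 j, orcStep (· + ·) i p.2 j)) p) (v, w)).1.length = 2 ^ n) ∧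
    (((List.range k).foldl (fun p i =>
        (List.range (2 ^ n)).foldl (fun (p : List Int × List Int) j =>
          (orcStep (· + ·) i p.1 j, orcStep (· + ·) i p.2 j)) p) (v, w)).2.length = 2 ^ n) ∧
    (∀ j, j < 2 ^ n →
      (((List.range k).foldl (fun p i =>
        (List.range (2 ^ n)).foldl (fun (p : List Int × List Int) j =>
          (orcStep (· + ·) i p.1 j, orcStep (· + ·) i p.2 j)) p) (v, w)).1.getD j 0
        ≡ Ub k (fun m => v.getD m 0) j [ZMOD 69]) ∧
      (((List.range k).foldl (fun p i =>
        (List.range (2 ^ n)).foldl (fun (p : List Int × List Int) j =>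
          (orcStep (· + ·) i p.1 j, orcStep (· + ·) i p.2 j)) p) (v, w)).2.getD j 0
        ≡ Ub k (fun m => w.getD m 0) j [ZMOD 69])) := by
  induction k with
  | zero =>
    refine ⟨hv, hw, fun j hj => ⟨?_, ?_⟩⟩ <;> exact Int.ModEq.refl _
  | succ k ih =>
    obtain ⟨ih1, ih2, ih3⟩ := ih
    rw [List.range_succ, List.foldl_concat]
    set P := (List.range k).foldl (fun p i =>
        (List.range (2 ^ n)).foldl (fun (p : List Int × List Int) j =>
          (orcStep (· + ·) i p.1 j, orcStep (· + ·) i p.2 j)) p) (v, w) with hP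
    rw [pvPairFold]
    have hop : ∀ x x' y y' : Int, x ≡ x' [ZMOD 69] → y ≡ y' [ZMOD 69] →
        x + y ≡ x' + y' [ZMOD 69] := fun _ _ _ _ h1 h2 => h1.add h2
    have t1 := pvRound_transport (· + ·) hop k P.1 (Ub k (fun m => v.getD m 0))
      (fun j hj => ih3 j (ih1 ▸ hj) |>.1)
    have t2 := pvRound_transport (· + ·) hop k P.2 (Ub k (fun m => w.getD m 0))
      (fun j hj => ih3 j (ih2 ▸ hj) |>.2)
    have l1 := (pvRoundUp (· + ·) k P.1 P.1.length le_rfl).1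
    have l2 := (pvRoundUp (· + ·) k P.2 P.2.length le_rfl).1
    rw [ih1] at t1 l1
    rw [ih2] at t2 l2
    exact ⟨by rw [l1], by rw [l2],
      fun j hj => ⟨t1.1 j hj, t2.1 j hj⟩⟩


theorem pvMoebius (n : Nat) (k : Nat) (c : List Int) (g : Nat → Int)
    (hc : c.length = 2 ^ n) (H : ∀ j, j < 2 ^ n → c.getD j 0 ≡ g j [ZMOD 69]) :
    ((((List.range k).reverse).foldl (fun c i =>
        ((List.range (2 ^ n)).reverse).foldl (fun c j => orcStep (· - ·) i c j) c) c).length = 2 ^ n) ∧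
    ∀ j, j < 2 ^ n →
      (((List.range k).reverse).foldl (fun c i =>
        ((List.range (2 ^ n)).reverse).foldl (fun c j => orcStep (· - ·) i c j) c) c).getD j 0
        ≡ Db k g j [ZMOD 69] := by
  induction k generalizing c g with
  | zero => exact ⟨hc, H⟩
  | succ k ih =>
    rw [List.range_succ, List.reverse_append]
    simp only [List.reverse_cons, List.reverse_nil, List.nil_append, List.cons_append,
      List.foldl_cons]
    have hop : ∀ x x' y y' : Int, x ≡ x' [ZMOD 69] → y ≡ y' [ZMOD 69] →
        x - y ≡ x' - y' [ZMOD 69] := fun _ _ _ _ h1 h2 => h1.sub h2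
    set c' := ((List.range (2 ^ n)).reverse).foldl (fun c j => orcStep (· - ·) k c j) c with hc'
    have hlen : c'.length = 2 ^ n := by
      rw [hc']
      have := (pvRoundDown (· - ·) k c (2 ^ n) (by omega)).1
      rw [← hc] at this ⊢
      simpa using this
    have hcong : ∀ j, j < 2 ^ n → c'.getD j 0 ≡ Ob (· - ·) k g j [ZMOD 69] := by
      intro j hj
      have h0 := (pvRound_transport (· - ·) hop k c g
        (fun j hj => H j (by rw [hc] at hj; exact hj))).2 j (by rw [hc]; exact hj)
      rw [hc] at h0
      exact h0
    exact ih c' (Ob (· - ·) k g) hlen hcong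


-- ---- the zeta transform is the subset-sum, and it turns OR-convolution into a product ----
def convF (fa fb : Nat → Int) (N : Nat) : Nat → Int :=
  fun j => ∑ x ∈ Finset.range N, ∑ y ∈ Finset.range N, (if x ||| y = j then fa x * fb y else 0)

theorem pvCondStep_false (s j k : Nat) (hb : j.testBit k = false) :
    (s ||| j = j ∧ s >>> k = j >>> k) ↔ (s ||| j = j ∧ s >>> (k + 1) = j >>> (k + 1)) := by
  constructor
  · rintro ⟨h1, h2⟩
    refine ⟨h1, (pvShiftRight_eq_iff s j (k + 1)).mpr fun t ht => ?_⟩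
    exact (pvShiftRight_eq_iff s j k).mp h2 t (by omega)
  · rintro ⟨h1, h2⟩
    refine ⟨h1, (pvShiftRight_eq_iff s j k).mpr fun t ht => ?_⟩
    by_cases htk : t = k
    · subst htk
      have hs : s.testBit t = false := by
        cases hschk : s.testBit t
        · rfl
        · exact absurd ((pvSubset_iff s j).mp h1 t hschk) (by rw [hb]; simp)
      rw [hs, hb]
    · exact (pvShiftRight_eq_iff s j (k + 1)).mp h2 t (by omega)

theorem pvCondStep_high (s j k : Nat) (hb : j.testBit k = true) (hs : s.testBit k = true) :
    (s ||| j = j ∧ s >>> (k + 1) = j >>> (k + 1)) ↔ (s ||| j = j ∧ s >>> k = j >>> k) := by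
  constructor
  · rintro ⟨h1, h2⟩
    refine ⟨h1, (pvShiftRight_eq_iff s j k).mpr fun t ht => ?_⟩
    by_cases htk : t = k
    · subst htk; rw [hs, hb]
    · exact (pvShiftRight_eq_iff s j (k + 1)).mp h2 t (by omega)
  · rintro ⟨h1, h2⟩
    exact ⟨h1, (pvShiftRight_eq_iff s j (k + 1)).mpr fun t ht =>
      (pvShiftRight_eq_iff s j k).mp h2 t (by omega)⟩

theorem pvCondStep_low (s j k : Nat) (hb : j.testBit k = true) (hs : s.testBit k = false) :
    (s ||| j = j ∧ s >>> (k + 1) = j >>> (k + 1)) ↔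
      (s ||| (j - 2 ^ k) = (j - 2 ^ k) ∧ s >>> k = (j - 2 ^ k) >>> k) := by
  have hj' := pvTestBit_sub_pow j k
  constructor
  · rintro ⟨h1, h2⟩
    constructor
    · refine (pvSubset_iff _ _).mpr fun t hst => ?_
      have htk : t ≠ k := fun h => by rw [h, hs] at hst; exact absurd hst (by simp)
      rw [hj' t hb, if_neg htk]
      exact (pvSubset_iff s j).mp h1 t hst
    · refine (pvShiftRight_eq_iff _ _ _).mpr fun t ht => ?_
      by_cases htk : t = k
      · subst htk; rw [hs, hj' t hb, if_pos rfl]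
      · rw [hj' t hb, if_neg htk]
        exact (pvShiftRight_eq_iff s j (k + 1)).mp h2 t (by omega)
  · rintro ⟨h1, h2⟩
    constructor
    · refine (pvSubset_iff _ _).mpr fun t hst => ?_
      have htk : t ≠ k := fun h => by rw [h, hs] at hst; exact absurd hst (by simp)
      have := (pvSubset_iff _ _).mp h1 t hst
      rw [hj' t hb, if_neg htk] at this
      exact this
    · refine (pvShiftRight_eq_iff _ _ _).mpr fun t ht => ?_
      have := (pvShiftRight_eq_iff _ _ _).mp h2 t (by omega)
      rw [hj' t hb, if_neg (by omega)] at this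
      exact this

theorem pvUb_sum (f : Nat → Int) (n k : Nat) (hk : k ≤ n) (j : Nat) (hj : j < 2 ^ n) :
    Ub k f j = ∑ s ∈ Finset.range (2 ^ n),
      (if s ||| j = j ∧ s >>> k = j >>> k then f s else 0) := by
  induction k generalizing j with
  | zero =>
    have : ∀ s ∈ Finset.range (2 ^ n),
        (if s ||| j = j ∧ s >>> 0 = j >>> 0 then f s else 0) = if s = j then f s else 0 := by
      intro s _
      simp only [Nat.shiftRight_zero]
      by_cases hsj : s = j
      · subst hsj; simp [Nat.or_self]
      · rw [if_neg (fun h => hsj h.2), if_neg hsj]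
    rw [Finset.sum_congr rfl this, Finset.sum_ite_eq' (Finset.range (2 ^ n)) j f,
      if_pos (Finset.mem_range.mpr hj)]
    rfl
  | succ k ih =>
    show Ob (· + ·) k (Ub k f) j = _
    unfold Ob
    by_cases hb : j.testBit k = true
    · rw [if_pos hb]
      have h2le : 2 ^ k ≤ j := Nat.ge_two_pow_of_testBit hb
      beta_reduce
      rw [ih (by omega) j hj,
        ih (by omega) (j - 2 ^ k) (Nat.lt_of_le_of_lt (Nat.sub_le j (2 ^ k)) hj),
        ← Finset.sum_add_distrib]
      refine Finset.sum_congr rfl fun s _ => ?_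
      by_cases hs : s.testBit k = true
      · have hC3 : ¬ (s ||| (j - 2 ^ k) = (j - 2 ^ k) ∧ s >>> k = (j - 2 ^ k) >>> k) := by
          rintro ⟨-, h2⟩
          have := (pvShiftRight_eq_iff _ _ _).mp h2 k le_rfl
          rw [hs, pvTestBit_sub_pow j k k hb, if_pos rfl] at this
          exact absurd this (by simp)
        rw [if_neg hC3, add_zero, if_congr (pvCondStep_high s j k hb hs).symm rfl rfl]
      · have hs' : s.testBit k = false := by cases h : s.testBit k; rfl; exact absurd h hs
        have hC2 : ¬ (s ||| j = j ∧ s >>> k = j >>> k) := by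
          rintro ⟨-, h2⟩
          have := (pvShiftRight_eq_iff _ _ _).mp h2 k le_rfl
          rw [hs', hb] at this
          exact absurd this (by simp)
        rw [if_neg hC2, zero_add, if_congr (pvCondStep_low s j k hb hs').symm rfl rfl]
    · have hb' : j.testBit k = false := by cases h : j.testBit k; rfl; exact absurd h hb
      rw [if_neg hb, ih (by omega) j hj]
      exact Finset.sum_congr rfl fun s _ =>
        if_congr (pvCondStep_false s j k hb') rfl rfl


theorem pvShiftHigh_eq (s j n : Nat) (hs : s < 2 ^ n) (hj : j < 2 ^ n) : s >>> n = j >>> n := by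
  rw [Nat.shiftRight_eq_div_pow, Nat.shiftRight_eq_div_pow,
    Nat.div_eq_of_lt hs, Nat.div_eq_of_lt hj]

theorem pvOrOr (x y j : Nat) : (x ||| y) ||| j = j ↔ (x ||| j = j ∧ y ||| j = j) := by
  simp only [pvSubset_iff, Nat.testBit_or, Bool.or_eq_true]
  constructor
  · intro h
    exact ⟨fun t ht => h t (Or.inl ht), fun t ht => h t (Or.inr ht)⟩
  · rintro ⟨h1, h2⟩ t (ht | ht)
    · exact h1 t ht
    · exact h2 t ht

theorem pvUb_conv (fa fb : Nat → Int) (n : Nat) (j : Nat) (hj : j < 2 ^ n) :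
    Ub n (convF fa fb (2 ^ n)) j = Ub n fa j * Ub n fb j := by
  have sumform : ∀ f : Nat → Int, Ub n f j =
      ∑ s ∈ Finset.range (2 ^ n), (if s ||| j = j then f s else 0) := by
    intro f
    rw [pvUb_sum f n n le_rfl j hj]
    refine Finset.sum_congr rfl fun s hs => ?_
    have := pvShiftHigh_eq s j n (Finset.mem_range.mp hs) hj
    exact if_congr (Iff.intro And.left (fun h => ⟨h, this⟩)) rfl rfl
  rw [sumform (convF fa fb (2 ^ n)), sumform fa, sumform fb]
  unfold convF
  calc
    ∑ s ∈ Finset.range (2 ^ n), (if s ||| j = j then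
        ∑ x ∈ Finset.range (2 ^ n), ∑ y ∈ Finset.range (2 ^ n),
          (if x ||| y = s then fa x * fb y else 0) else 0)
      = ∑ s ∈ Finset.range (2 ^ n), ∑ x ∈ Finset.range (2 ^ n), ∑ y ∈ Finset.range (2 ^ n),
          (if s ||| j = j then (if x ||| y = s then fa x * fb y else 0) else 0) := by
        refine Finset.sum_congr rfl fun s _ => ?_
        by_cases hC : s ||| j = j <;> simp [hC]
    _ = ∑ x ∈ Finset.range (2 ^ n), ∑ y ∈ Finset.range (2 ^ n), ∑ s ∈ Finset.range (2 ^ n),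
          (if s ||| j = j then (if x ||| y = s then fa x * fb y else 0) else 0) := by
        rw [Finset.sum_comm]
        refine Finset.sum_congr rfl fun x _ => Finset.sum_comm
    _ = ∑ x ∈ Finset.range (2 ^ n), ∑ y ∈ Finset.range (2 ^ n),
          (if (x ||| y) ||| j = j then fa x * fb y else 0) := by
        refine Finset.sum_congr rfl fun x hx => Finset.sum_congr rfl fun y hy => ?_
        have hxy : x ||| y ∈ Finset.range (2 ^ n) := Finset.mem_range.mpr
          (Nat.or_lt_two_pow (Finset.mem_range.mp hx) (Finset.mem_range.mp hy))
        have hpt : ∀ s ∈ Finset.range (2 ^ n),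
            (if s ||| j = j then (if x ||| y = s then fa x * fb y else 0) else 0) =
            (if s = x ||| y then (if (x ||| y) ||| j = j then fa x * fb y else 0) else 0) := by
          intro s _
          by_cases hse : s = x ||| y
          · rw [hse]; by_cases hC : (x ||| y) ||| j = j <;> simp [hC]
          · rw [if_neg hse]
            by_cases hC : s ||| j = j
            · rw [if_pos hC, if_neg (fun h => hse h.symm)]
            · rw [if_neg hC]
        rw [Finset.sum_congr rfl hpt, Finset.sum_ite_eq' _ _ _, if_pos hxy]
    _ = ∑ x ∈ Finset.range (2 ^ n), ∑ y ∈ Finset.range (2 ^ n),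
          ((if x ||| j = j then fa x else 0) * (if y ||| j = j then fb y else 0)) := by
        refine Finset.sum_congr rfl fun x _ => Finset.sum_congr rfl fun y _ => ?_
        by_cases h1 : x ||| j = j <;> by_cases h2 : y ||| j = j <;>
          simp [pvOrOr, h1, h2]
    _ = (∑ x ∈ Finset.range (2 ^ n), (if x ||| j = j then fa x else 0)) *
          (∑ y ∈ Finset.range (2 ^ n), (if y ||| j = j then fb y else 0)) := by
        rw [Finset.sum_mul_sum]


-- ---- B's double loop accumulates exactly convF, entrywise reduced mod 69 ----
theorem pvBInner (x N : Nat) (w : Nat → Int) (c : List Int) (hc : c.length = N)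
    (hOr : ∀ y, y < N → x ||| y < N)
    (hb : ∀ j, j < N → 0 ≤ c.getD j 0 ∧ c.getD j 0 < 69) (t : Nat) (ht : t ≤ N) :
    (((List.range t).foldl (fun c y =>
        c.set (x ||| y) (PySem.Int.mod (c.getD (x ||| y) 0 + w y) 69)) c).length = N) ∧
    (∀ j, j < N → 0 ≤ ((List.range t).foldl (fun c y =>
        c.set (x ||| y) (PySem.Int.mod (c.getD (x ||| y) 0 + w y) 69)) c).getD j 0 ∧
      ((List.range t).foldl (fun c y =>
        c.set (x ||| y) (PySem.Int.mod (c.getD (x ||| y) 0 + w y) 69)) c).getD j 0 < 69) ∧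
    ∀ j, j < N →
      ((List.range t).foldl (fun c y =>
        c.set (x ||| y) (PySem.Int.mod (c.getD (x ||| y) 0 + w y) 69)) c).getD j 0
        ≡ c.getD j 0 + ∑ y ∈ Finset.range t, (if x ||| y = j then w y else 0) [ZMOD 69] := by
  induction t with
  | zero => exact ⟨hc, hb, fun j hj => by simp⟩
  | succ t ih =>
    obtain ⟨ihl, ihb, ihc⟩ := ih (by omega)
    rw [List.range_succ, List.foldl_concat]
    set r := (List.range t).foldl (fun c y =>
        c.set (x ||| y) (PySem.Int.mod (c.getD (x ||| y) 0 + w y) 69)) c with hr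
    have hk0 : x ||| t < N := hOr t (by omega)
    have hkr : x ||| t < r.length := by omega
    have hsetself : ∀ v : Int, (r.set (x ||| t) v).getD (x ||| t) 0 = v := by
      intro v; simp [List.getD, List.getElem?_set, hkr]
    have hsetne : ∀ (v : Int) (j : Nat), j ≠ x ||| t → (r.set (x ||| t) v).getD j 0 = r.getD j 0 := by
      intro v j hj; simp [List.getD, List.getElem?_set, Ne.symm hj]
    refine ⟨by simp [ihl], fun j hj => ?_, fun j hj => ?_⟩
    · by_cases hje : j = x ||| t
      · subst hje; rw [hsetself]; exact pvMod_bounds _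
      · rw [hsetne _ j hje]; exact ihb j hj
    · rw [Finset.sum_range_succ]
      by_cases hje : j = x ||| t
      · subst hje
        rw [hsetself, if_pos rfl]
        calc PySem.Int.mod (r.getD (x ||| t) 0 + w t) 69
            ≡ r.getD (x ||| t) 0 + w t [ZMOD 69] := pvMod_modEq _
          _ ≡ c.getD (x ||| t) 0 + (∑ y ∈ Finset.range t,
                (if x ||| y = x ||| t then w y else 0)) + w t [ZMOD 69] :=
              Int.ModEq.add_right _ (ihc _ hj)
          _ = c.getD (x ||| t) 0 + ((∑ y ∈ Finset.range t,
                (if x ||| y = x ||| t then w y else 0)) + w t) := by ring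
      · rw [hsetne _ j hje, if_neg (fun h => hje h.symm), add_zero]
        exact ihc j hj


theorem pvBOuter (n : Nat) (wa wb : Nat → Int) (t : Nat) (ht : t ≤ 2 ^ n) :
    (((List.range t).foldl (fun c x =>
        (List.range (2 ^ n)).foldl (fun (c : List Int) y =>
          c.set (x ||| y) (PySem.Int.mod (c.getD (x ||| y) 0 + wa x * wb y) 69)) c)
        (List.replicate (2 ^ n) 0)).length = 2 ^ n) ∧
    (∀ j, j < 2 ^ n → 0 ≤ ((List.range t).foldl (fun c x =>
        (List.range (2 ^ n)).foldl (fun (c : List Int) y =>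
          c.set (x ||| y) (PySem.Int.mod (c.getD (x ||| y) 0 + wa x * wb y) 69)) c)
        (List.replicate (2 ^ n) 0)).getD j 0 ∧
      ((List.range t).foldl (fun c x =>
        (List.range (2 ^ n)).foldl (fun (c : List Int) y =>
          c.set (x ||| y) (PySem.Int.mod (c.getD (x ||| y) 0 + wa x * wb y) 69)) c)
        (List.replicate (2 ^ n) 0)).getD j 0 < 69) ∧
    ∀ j, j < 2 ^ n →
      ((List.range t).foldl (fun c x =>
        (List.range (2 ^ n)).foldl (fun (c : List Int) y =>
          c.set (x ||| y) (PySem.Int.mod (c.getD (x ||| y) 0 + wa x * wb y) 69)) c)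
        (List.replicate (2 ^ n) 0)).getD j 0
        ≡ ∑ x ∈ Finset.range t, ∑ y ∈ Finset.range (2 ^ n),
            (if x ||| y = j then wa x * wb y else 0) [ZMOD 69] := by
  induction t with
  | zero =>
    refine ⟨by simp, fun j hj => ?_, fun j hj => ?_⟩
    · rw [List.getD_eq_getElem _ _ (by simpa using hj)]
      simp
    · rw [List.getD_eq_getElem _ _ (by simpa using hj)]
      simp
  | succ t ih =>
    obtain ⟨ihl, ihb, ihc⟩ := ih (by omega)
    rw [List.range_succ, List.foldl_concat]
    set r := (List.range t).foldl (fun c x =>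
        (List.range (2 ^ n)).foldl (fun (c : List Int) y =>
          c.set (x ||| y) (PySem.Int.mod (c.getD (x ||| y) 0 + wa x * wb y) 69)) c)
        (List.replicate (2 ^ n) 0) with hrdef
    have hOr : ∀ y, y < 2 ^ n → t ||| y < 2 ^ n := fun y hy =>
      Nat.or_lt_two_pow (by omega) hy
    have hinner := pvBInner t (2 ^ n) (fun y => wa t * wb y) r ihl hOr ihb (2 ^ n) le_rfl
    obtain ⟨hl2, hb2, hc2⟩ := hinner
    refine ⟨hl2, hb2, fun j hj => ?_⟩
    rw [Finset.sum_range_succ]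
    calc ((List.range (2 ^ n)).foldl (fun c y =>
            c.set (t ||| y) (PySem.Int.mod (c.getD (t ||| y) 0 + wa t * wb y) 69)) r).getD j 0
        ≡ r.getD j 0 + ∑ y ∈ Finset.range (2 ^ n),
            (if t ||| y = j then wa t * wb y else 0) [ZMOD 69] := hc2 j hj
      _ ≡ (∑ x ∈ Finset.range t, ∑ y ∈ Finset.range (2 ^ n),
            (if x ||| y = j then wa x * wb y else 0)) + ∑ y ∈ Finset.range (2 ^ n),
            (if t ||| y = j then wa t * wb y else 0) [ZMOD 69] :=
          Int.ModEq.add_right _ (ihc j hj)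


-- ---- odds and ends for the final assembly ----
theorem pvOrcN_ge (m n : Nat) : m ≤ 1 <<< orcN m n := by
  rw [orcN]
  split
  · exact pvOrcN_ge m (n + 1)
  · omega
termination_by m - n
decreasing_by
  rename_i h
  have hn : n < 1 <<< n := by simpa [Nat.one_shiftLeft] using Nat.lt_two_pow_self (n := n)
  omega


theorem pvPad_length (xs : List Int) (N : Nat) (h : xs.length ≤ N) :
    (orcPad xs N).length = N := by
  simp [orcPad]; omega


theorem pvMain (a b : List Int) : orconvolve a b = orconvolve_alt a b := by
  unfold orconvolve orconvolve_alt
  simp only [Nat.one_shiftLeft]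
  set n := orcN (max a.length b.length) 0 with hn
  have hm : max a.length b.length ≤ 2 ^ n := by
    rw [← Nat.one_shiftLeft]; exact pvOrcN_ge _ 0
  have ha2 : (orcPad a (2 ^ n)).length = 2 ^ n := pvPad_length _ _ (by omega)
  have hb2 : (orcPad b (2 ^ n)).length = 2 ^ n := pvPad_length _ _ (by omega)
  set a2 := orcPad a (2 ^ n) with ha2d
  set b2 := orcPad b (2 ^ n) with hb2d
  set fa : Nat → Int := fun m => a2.getD m 0 with hfa
  set fb : Nat → Int := fun m => b2.getD m 0 with hfb
  obtain ⟨hA1, hA2, hA3⟩ := pvZeta n a2 b2 ha2 hb2 n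
  set AB := (List.range n).foldl (fun p i =>
      (List.range (2 ^ n)).foldl (fun (p : List Int × List Int) j =>
        (orcStep (· + ·) i p.1 j, orcStep (· + ·) i p.2 j)) p) (a2, b2) with hAB
  set c0 := (List.range (2 ^ n)).map (fun i => PySem.Int.mod (AB.1.getD i 0 * AB.2.getD i 0) 69)
    with hc0
  have hc0l : c0.length = 2 ^ n := by simp [hc0]
  have hcong : ∀ j, j < 2 ^ n → c0.getD j 0 ≡ Ub n (convF fa fb (2 ^ n)) j [ZMOD 69] := by
    intro j hj
    have hc0e : c0.getD j 0 = PySem.Int.mod (AB.1.getD j 0 * AB.2.getD j 0) 69 := by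
      rw [hc0, List.getD_eq_getElem _ _ (by simpa using hj)]
      simp
    rw [hc0e, pvUb_conv fa fb n j hj]
    exact (pvMod_modEq _).trans (((hA3 j hj).1).mul ((hA3 j hj).2))
  obtain ⟨hM1, hM2⟩ := pvMoebius n n c0 (Ub n (convF fa fb (2 ^ n))) hc0l hcong
  set c1 := ((List.range n).reverse).foldl (fun c i =>
      ((List.range (2 ^ n)).reverse).foldl (fun c j => orcStep (· - ·) i c j) c) c0 with hc1
  have hDb : ∀ j, j < 2 ^ n → c1.getD j 0 ≡ convF fa fb (2 ^ n) j [ZMOD 69] := by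
    intro j hj
    have h0 := hM2 j hj
    rwa [pvDb_Ub] at h0
  obtain ⟨hB1, hB2, hB3⟩ := pvBOuter n fa fb (2 ^ n) le_rfl
  set Bres := (List.range (2 ^ n)).foldl (fun c x =>
      (List.range (2 ^ n)).foldl (fun (c : List Int) y =>
        c.set (x ||| y) (PySem.Int.mod (c.getD (x ||| y) 0 + fa x * fb y) 69)) c)
      (List.replicate (2 ^ n) 0) with hBres
  apply List.ext_getElem
  · simp [hM1, hB1]
  · intro j h1 h2
    have hj : j < 2 ^ n := by
      have : (c1.map (fun x => PySem.Int.mod (x + 69) 69)).length = 2 ^ n := by simp [hM1]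
      omega
    rw [List.getElem_map]
    have hc1g : c1[j] = c1.getD j 0 := (List.getD_eq_getElem c1 0 (by omega)).symm
    have hBg : Bres[j] = Bres.getD j 0 := (List.getD_eq_getElem Bres 0 h2).symm
    rw [hc1g, hBg]
    have hAval : PySem.Int.mod (c1.getD j 0 + 69) 69 = convF fa fb (2 ^ n) j % 69 := by
      rw [PySem.Int.mod_eq_emod_of_pos (by norm_num), Int.add_emod_right]
      exact hDb j hj
    have hBval : Bres.getD j 0 = convF fa fb (2 ^ n) j % 69 := by
      have hbd := hB2 j hj
      have hself : Bres.getD j 0 % 69 = Bres.getD j 0 :=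
        Int.emod_eq_of_lt hbd.1 hbd.2
      have hmeq : Bres.getD j 0 % 69 = convF fa fb (2 ^ n) j % 69 := hB3 j hj
      rw [← hself, hmeq]
    rw [hAval, hBval]

-- ===== VERDICT (by name: the statement is the Claim_ definition above) =====
theorem orconvolve_spec : Claim_equal_orconvolve := by
  intro a b _
  unfold Spec_orconvolve
  exact pvMain a b
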